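-- pv_equiv track=rewrite | github.com/DhyeyShah794/project_euler | euler_45.py | pentagonal_num_gen
-- ===== SOURCE A (Python) =====
-- def pentagonal_num_gen(num_of_terms: int) -> set:
--     start_term: int = 1
--     pentagonal_numbers = set()
--     pentagonal_numbers.add(1)
--     for i in range(4, 3 * num_of_terms + 1, 3):  # Multiply by 3 since incrementing i by 3
--         start_term += i
--         pentagonal_numbers.add(start_term)
--     return pentagonal_numbers
-- ===== SOURCE B (Python) =====
-- def pentagonal_num_gen(num_of_terms: int) -> set:
--     pentagonal_numbers = {1}
--     for k in range(2, num_of_terms + 1):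
--         pentagonal_numbers.add(k * (3 * k - 1) // 2)
--     return pentagonal_numbers
-- ===== Notes on version B (the rewrite author's own statement) =====
-- stated objective: simpler
-- what changed: B drops the running accumulator with stepped +3 increments and instead adds the closed-form pentagonal number k*(3*k-1)//2 for each k in range(2, n+1) to the seed set {1}.
import Mathlib
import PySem

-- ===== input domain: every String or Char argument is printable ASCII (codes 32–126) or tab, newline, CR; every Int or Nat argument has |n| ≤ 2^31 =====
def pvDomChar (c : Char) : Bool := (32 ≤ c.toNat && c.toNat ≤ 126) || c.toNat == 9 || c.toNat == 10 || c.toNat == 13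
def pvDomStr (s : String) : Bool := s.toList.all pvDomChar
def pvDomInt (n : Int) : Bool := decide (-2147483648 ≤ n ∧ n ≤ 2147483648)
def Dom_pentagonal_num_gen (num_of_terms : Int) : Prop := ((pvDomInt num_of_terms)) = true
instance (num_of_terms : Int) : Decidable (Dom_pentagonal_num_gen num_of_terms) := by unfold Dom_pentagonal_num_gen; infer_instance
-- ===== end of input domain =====

-- B replaces A's running accumulator (stepped +3 increments) by the closed-form
-- pentagonal number k*(3*k-1)//2 per index; objective: simpler.

-- ===== PORT A =====
def pentagonal_num_gen (num_of_terms : Int) : List Int :=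
  let init : Int × PySem.Set Int := (1, PySem.Set.add PySem.Set.empty 1)
  let r := (PySem.List.pyRange 4 (3 * num_of_terms + 1) 3).foldl
    (fun (st : Int × PySem.Set Int) i =>
      let start_term := st.1 + i
      (start_term, PySem.Set.add st.2 start_term)) init
  r.2

-- ===== PORT B =====
def pentagonal_num_gen_alt (num_of_terms : Int) : List Int :=
  (PySem.List.pyRange 2 (num_of_terms + 1) 1).foldl
    (fun (s : PySem.Set Int) k => PySem.Set.add s (PySem.Int.floordiv (k * (3 * k - 1)) 2))
    (PySem.Set.add PySem.Set.empty 1)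

-- ===== PRECONDITION & SPEC =====
def Spec_pentagonal_num_gen (num_of_terms : Int) (out : List Int) : Prop := out = pentagonal_num_gen_alt num_of_terms
instance (num_of_terms : Int) (out : List Int) : Decidable (Spec_pentagonal_num_gen num_of_terms out) := by unfold Spec_pentagonal_num_gen; infer_instance

-- ===== CLAIM (what is proved, stated in full; the proofs are below) =====
def Claim_equal_pentagonal_num_gen : Prop := ∀ (num_of_terms : Int), Dom_pentagonal_num_gen num_of_terms → Spec_pentagonal_num_gen num_of_terms (pentagonal_num_gen num_of_terms)

-- ===== LEMMAS AND PROOFS =====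

-- Both loops, run for the same number m of iterations, build the same set:
-- A's running start_term t satisfies 2*t = (k-1)*(3*k-4) (t is the (k-1)-st
-- pentagonal number), A's next increment is 3*k-2, and B adds k*(3*k-1)//2.
theorem pentagonal_loops_eq : ∀ (m : Nat) (k t : Int) (s : PySem.Set Int),
    2 * t = (k - 1) * (3 * k - 4) →
    (((List.range m).map (fun j : Nat => 3 * k - 2 + 3 * (j : Int))).foldl
      (fun (st : Int × PySem.Set Int) i =>
        let start_term := st.1 + i
        (start_term, PySem.Set.add st.2 start_term)) (t, s)).2 =
    ((List.range m).map (fun j : Nat => k + (j : Int))).foldl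
      (fun (s : PySem.Set Int) x => PySem.Set.add s (PySem.Int.floordiv (x * (3 * x - 1)) 2)) s := by
  intro m
  induction m with
  | zero => intro k t s h; simp
  | succ m ih =>
    intro k t s h
    have hA : (List.range (m + 1)).map (fun j : Nat => 3 * k - 2 + 3 * (j : Int))
        = (3 * k - 2) :: (List.range m).map (fun j : Nat => 3 * (k + 1) - 2 + 3 * (j : Int)) := by
      rw [List.range_succ_eq_map, List.map_cons, List.map_map]
      congr 1
      · push_cast; ring
      · apply List.map_congr_left; intro j _; simp [Function.comp]; ring
    have hB : (List.range (m + 1)).map (fun j : Nat => k + (j : Int))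
        = k :: (List.range m).map (fun j : Nat => (k + 1) + (j : Int)) := by
      rw [List.range_succ_eq_map, List.map_cons, List.map_map]
      congr 1
      · push_cast; ring
      · apply List.map_congr_left; intro j _; simp [Function.comp]; ring
    rw [hA, hB, List.foldl_cons, List.foldl_cons]
    have hval : PySem.Int.floordiv (k * (3 * k - 1)) 2 = t + (3 * k - 2) := by
      have h2 : k * (3 * k - 1) = 2 * (t + (3 * k - 2)) := by linear_combination -h
      rw [h2]
      show (2 * (t + (3 * k - 2))).fdiv 2 = t + (3 * k - 2)
      exact Int.mul_fdiv_cancel_left _ (by norm_num)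
    rw [hval]
    exact ih (k + 1) (t + (3 * k - 2)) _ (by linear_combination h)

-- ===== VERDICT (by name: the statement is the Claim_ definition above) =====
theorem pentagonal_num_gen_spec : Claim_equal_pentagonal_num_gen := by
  intro n _
  show pentagonal_num_gen n = pentagonal_num_gen_alt n
  unfold pentagonal_num_gen pentagonal_num_gen_alt
  rw [PySem.List.pyRange_of_pos 4 (3 * n + 1) (by norm_num),
      PySem.List.pyRange_one 2 (n + 1)]
  have hlen : (if (4 : Int) < 3 * n + 1 then ((3 * n + 1 - 4 + 3 - 1) / 3).toNat else 0)
      = (n + 1 - 2).toNat := by split_ifs with h <;> omega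
  rw [hlen]
  have hfA : (fun k : Nat => (4 : Int) + 3 * (k : Int)) = (fun j : Nat => 3 * (2 : Int) - 2 + 3 * (j : Int)) := by
    funext j; ring
  simp only [hfA]
  exact pentagonal_loops_eq _ 2 1 _ (by norm_num)
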